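-- pv_equiv track=rewrite | github.com/monanadmin/monan | codigos_originais/GEF_v1.0.0/gef_trunk/RUN/src/check.py | busca_end
-- ===== SOURCE A (Python) =====
-- def busca_end(li,label,do_data):
-- 	aninhado = 0
-- 	max_aninhamento=0
-- 	for do in do_data:
-- 		if do[0]<=li:
-- 			continue
-- 		if do[1]==label:
-- 			return do[0],max_aninhamento
-- 		if do[1]=="do":
-- 			aninhado = aninhado+1
-- 			max_aninhamento=max(max_aninhamento,aninhado)
-- 	return 0,0
-- ===== SOURCE B (Python) =====
-- def busca_end(li, label, do_data):
--     res = None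
--     for d in reversed(do_data):
--         if d[0] <= li:
--             continue
--         if d[1] == label:
--             res = (d[0], 0)
--         elif res is not None and d[1] == "do":
--             res = (res[0], res[1] + 1)
--     return res if res is not None else (0, 0)
-- ===== Notes on version B (the rewrite author's own statement) =====
-- stated objective: alternative
-- what changed: Replaces A's forward stateful sweep (running nesting counter + max, early return) by a reverse scan building an optional result back-to-front: an earlier label match overwrites, and each preceding 'do' increments the pending result's nesting on the way back.
import Mathlib
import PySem

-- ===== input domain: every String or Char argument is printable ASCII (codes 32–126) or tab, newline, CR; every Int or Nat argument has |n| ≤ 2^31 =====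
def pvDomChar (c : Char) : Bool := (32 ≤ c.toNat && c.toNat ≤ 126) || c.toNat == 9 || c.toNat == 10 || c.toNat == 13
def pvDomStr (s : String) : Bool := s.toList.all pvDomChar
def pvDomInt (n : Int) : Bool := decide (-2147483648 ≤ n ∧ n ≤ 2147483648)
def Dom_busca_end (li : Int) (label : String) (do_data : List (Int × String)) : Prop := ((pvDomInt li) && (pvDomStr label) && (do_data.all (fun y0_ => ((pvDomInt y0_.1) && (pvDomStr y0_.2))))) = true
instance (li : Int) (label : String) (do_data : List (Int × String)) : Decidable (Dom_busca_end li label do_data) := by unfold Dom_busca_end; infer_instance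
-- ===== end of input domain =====

-- B replaces A's forward stateful sweep (running counter + max, early return) by a
-- reverse scan building an optional result back-to-front; alternative, same cost.
-- ===== PORT A =====
def buscaLoop (li : Int) (label : String) : List (Int × String) → Int → Int → Int × Int
  | [], _, _ => (0, 0)
  | d :: rest, aninhado, maxA =>
    if d.1 ≤ li then buscaLoop li label rest aninhado maxA
    else if d.2 == label then (d.1, maxA)
    else if d.2 == "do" then
      buscaLoop li label rest (aninhado + 1) (max maxA (aninhado + 1))
    else buscaLoop li label rest aninhado maxA

def busca_end (li : Int) (label : String) (do_data : List (Int × String)) : Int × Int :=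
  buscaLoop li label do_data 0 0

-- ===== PORT B =====
-- step of Source B's loop body (res is the optional pending result)
def buscaStep (li : Int) (label : String) (res : Option (Int × Int)) (d : Int × String) :
    Option (Int × Int) :=
  if d.1 ≤ li then res
  else if d.2 == label then some (d.1, 0)
  else
    match res with
    | some r => if d.2 == "do" then some (r.1, r.2 + 1) else some r
    | none => none

def busca_end_alt (li : Int) (label : String) (do_data : List (Int × String)) : Int × Int :=
  (do_data.reverse.foldl (buscaStep li label) none).getD (0, 0)

-- ===== PRECONDITION & SPEC =====
def Spec_busca_end (li : Int) (label : String) (do_data : List (Int × String)) (out : Int × Int) : Prop := out = busca_end_alt li label do_data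
instance (li : Int) (label : String) (do_data : List (Int × String)) (out : Int × Int) : Decidable (Spec_busca_end li label do_data out) := by unfold Spec_busca_end; infer_instance

-- ===== CLAIM (what is proved, stated in full; the proofs are below) =====
def Claim_equal_busca_end : Prop := ∀ (li : Int) (label : String) (do_data : List (Int × String)), Dom_busca_end li label do_data → Spec_busca_end li label do_data (busca_end li label do_data)

-- ===== LEMMAS AND PROOFS =====
-- the reverse foldl is a right fold, i.e. the structural recursion `go`
theorem foldl_reverse_step (li : Int) (label : String) (dd : List (Int × String)) :
    dd.reverse.foldl (buscaStep li label) none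
      = dd.foldr (fun d r => buscaStep li label r d) none := by
  simp [List.foldl_reverse]

-- A's loop, started with aninhado = maxA = a, returns the back-to-front result
-- with its nesting component shifted by a.
theorem buscaLoop_eq_foldr (li : Int) (label : String) :
    ∀ (dd : List (Int × String)) (a : Int),
      buscaLoop li label dd a a =
        match dd.foldr (fun d r => buscaStep li label r d) none with
        | none => (0, 0)
        | some (p, c) => (p, a + c) := by
  intro dd
  induction dd with
  | nil => intro a; simp [buscaLoop]
  | cons d rest ih =>
    intro a
    by_cases h1 : d.1 ≤ li
    · simpa [buscaLoop, h1, buscaStep] using ih a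
    · by_cases h2 : d.2 = label
      · simp [buscaLoop, h1, h2, buscaStep]
      · by_cases h3 : d.2 = "do"
        · have hstep : buscaLoop li label (d :: rest) a a
              = buscaLoop li label rest (a + 1) (a + 1) := by
            simp [buscaLoop, h1, h3]
            exact fun hc => absurd (h3.trans hc) h2
          rw [hstep, ih (a + 1)]
          simp only [List.foldr_cons]
          cases hfi : rest.foldr (fun d r => buscaStep li label r d) none with
          | none => simp [buscaStep, h1, h3, h3 ▸ h2]
          | some r =>
            cases r
            simp [buscaStep, h1, h3, h3 ▸ h2]; omega
        · have hstep : buscaLoop li label (d :: rest) a a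
              = buscaLoop li label rest a a := by
            simp [buscaLoop, h1, h2, h3]
          rw [hstep, ih a]
          simp only [List.foldr_cons]
          cases hfi : rest.foldr (fun d r => buscaStep li label r d) none with
          | none => simp [buscaStep, h1, h2]
          | some r => cases r; simp [buscaStep, h1, h2, h3]

-- ===== VERDICT (by name: the statement is the Claim_ definition above) =====
theorem busca_end_spec : Claim_equal_busca_end := by
  intro li label dd _hdom
  unfold Spec_busca_end busca_end busca_end_alt
  rw [foldl_reverse_step, buscaLoop_eq_foldr li label dd 0]
  cases hfi : dd.foldr (fun d r => buscaStep li label r d) none with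
  | none => simp
  | some r => cases r; simp
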